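-- pv_equiv track=rewrite | github.com/rizkyprilian/Purwadhika-JCDS0804-Python1-Exam | ujian.py | hollowTriangle
-- ===== SOURCE A (Python) =====
-- from math import floor
--
-- def hollowTriangle(rowHeight):
--     z = ''
--     if rowHeight < 1:
--         z = ''
--     elif rowHeight == 1:
--         z = '#'
--     else:
--
--         # there is a pattern for the bottom part of the triangle
--         # this number will determine the max width of each row
--         # row height -> max row width
--         # 2->3, 3->5, 4->7, 5->9, 6->11
--         # if row number is n, the math formula of nth row is 2n-1
--
--         # maxRowWidth will returns odd numbers
--         maxRowWidth = (2*rowHeight) - 1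
--
--         # the first row will be all _'s with one # at the center
--         z += ('_'*int(floor(maxRowWidth/2))) + '#' + ('_'*int(floor(maxRowWidth/2)))
--         z += '\n'
--
--         # middle rows on rowHeight more than two
--         # if rowHeight = 3, there are 1 midrow, for rowHeight 4, there is 2 midrow
--         if rowHeight > 2:
--             for midRowNum in range(0,rowHeight - 2):
--
--                 # center underscores (the hollow part) pattern is sequence of odd numbers
--                 # 1,3,5,7,9,11
--                 # 2n+1
--                 numOfCenterUnderscores = (2*midRowNum) + 1
--
--                 # the centerunderscores will be in between two #
--                 # since we know the maxRowWidth, we can know the number of outside _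
--                 numOfOutsideUnderscores = int(floor((maxRowWidth - (numOfCenterUnderscores + 2)) / 2))
--
--                 # next we print the middle rows
--                 z += ('_'*numOfOutsideUnderscores) + '#' + ('_'*numOfCenterUnderscores) + '#' + ('_'*numOfOutsideUnderscores)
--                 z += '\n'
--
--         # the last row will consists of all #'s with the width of maxRowWidth
--         z += '#'*maxRowWidth
--
--     return z
-- ===== SOURCE B (Python) =====
-- def hollowTriangle(rowHeight):
--     if rowHeight < 1:
--         return ''
--     halves = ['_' * (rowHeight - 1 - r) + '#' + '_' * r for r in range(rowHeight - 1)]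
--     halves.append('#' * rowHeight)
--     return '\n'.join(h + h[:-1][::-1] for h in halves)
-- ===== Notes on version B (the rewrite author's own statement) =====
-- stated objective: simpler
-- what changed: B exploits the triangle's left-right symmetry: it builds only the left half of each row (one '#' placed by its position, plus an all-'#' half for the base), mirrors each half with a reversed slice and joins the rows, instead of A's accumulation of full rows from outside/center underscore-run lengths computed with floor divisions.
import Mathlib
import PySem

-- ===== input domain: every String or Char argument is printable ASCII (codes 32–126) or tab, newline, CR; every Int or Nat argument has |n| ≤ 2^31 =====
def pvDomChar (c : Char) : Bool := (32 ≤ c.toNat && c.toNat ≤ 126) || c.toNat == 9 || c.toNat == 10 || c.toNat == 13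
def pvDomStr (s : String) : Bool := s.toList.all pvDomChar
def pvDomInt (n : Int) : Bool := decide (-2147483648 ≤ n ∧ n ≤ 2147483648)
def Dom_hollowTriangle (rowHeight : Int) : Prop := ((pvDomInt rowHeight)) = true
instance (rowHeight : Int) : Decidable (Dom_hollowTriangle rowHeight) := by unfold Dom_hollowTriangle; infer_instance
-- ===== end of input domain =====

-- B builds only the left half of each row (one '#' placed by position, an all-'#'
-- half for the base), mirrors it with a reversed slice and joins the rows, instead
-- of A's outside/center underscore-run arithmetic; objective: simpler (same cost).

-- ===== PORT A =====
-- Strings are built on the List Char side (PySem convention); String.ofList at the end.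
-- '_' * n  is  PySem.List.pyRepeat ['_'] n;  int(floor(w/2)) with w ≥ 3 odd is exactly
-- PySem.Int.floordiv w 2 (w < 2^32, so the float division is exact).
def hollowTriangle (rowHeight : Int) : String :=
  if rowHeight < 1 then String.ofList []
  else if rowHeight = 1 then String.ofList ['#']
  else
    let maxRowWidth : Int := 2 * rowHeight - 1
    let z : List Char :=
      [] ++ PySem.List.pyRepeat ['_'] (PySem.Int.floordiv maxRowWidth 2) ++ ['#']
         ++ PySem.List.pyRepeat ['_'] (PySem.Int.floordiv maxRowWidth 2)
    let z := z ++ ['\n']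
    let z :=
      if rowHeight > 2 then
        (PySem.List.pyRange 0 (rowHeight - 2) 1).foldl (fun z midRowNum =>
          let numOfCenterUnderscores : Int := 2 * midRowNum + 1
          let numOfOutsideUnderscores : Int :=
            PySem.Int.floordiv (maxRowWidth - (numOfCenterUnderscores + 2)) 2
          (z ++ PySem.List.pyRepeat ['_'] numOfOutsideUnderscores ++ ['#']
             ++ PySem.List.pyRepeat ['_'] numOfCenterUnderscores ++ ['#']
             ++ PySem.List.pyRepeat ['_'] numOfOutsideUnderscores) ++ ['\n']) z
      else z
    String.ofList (z ++ PySem.List.pyRepeat ['#'] maxRowWidth)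

-- ===== PORT B =====
-- '\n'.join is PySem.Chars.join; h[:-1] is PySem.List.slice · none (some (-1));
-- h[::-1] is PySem.List.slice? · none none (-1) (always some for step -1, hence .getD []).
def hollowTriangle_alt (rowHeight : Int) : String :=
  if rowHeight < 1 then String.ofList []
  else
    let halves : List (List Char) :=
      ((PySem.List.pyRange 0 (rowHeight - 1) 1).map (fun r =>
          PySem.List.pyRepeat ['_'] (rowHeight - 1 - r) ++ ['#']
            ++ PySem.List.pyRepeat ['_'] r))
        ++ [PySem.List.pyRepeat ['#'] rowHeight]
    String.ofList (PySem.Chars.join ['\n']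
      (halves.map (fun hrow =>
        hrow ++ (PySem.List.slice? (PySem.List.slice hrow none (some (-1)))
                  none none (-1)).getD [])))

-- ===== PRECONDITION & SPEC =====
def Spec_hollowTriangle (rowHeight : Int) (out : String) : Prop := out = hollowTriangle_alt rowHeight
instance (rowHeight : Int) (out : String) : Decidable (Spec_hollowTriangle rowHeight out) := by unfold Spec_hollowTriangle; infer_instance

-- ===== CLAIM (what is proved, stated in full; the proofs are below) =====
def Claim_equal_hollowTriangle : Prop := ∀ (rowHeight : Int), Dom_hollowTriangle rowHeight → Spec_hollowTriangle rowHeight (hollowTriangle rowHeight)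

-- ===== LEMMAS AND PROOFS =====

-- the common normal form both ports are reduced to
def pvMidRow (h k : Nat) : List Char :=
  List.replicate (h - 2 - k) '_' ++ '#' :: List.replicate (2 * k + 1) '_'
    ++ '#' :: List.replicate (h - 2 - k) '_'

def pvTriangle (h : Nat) : List Char :=
  (List.replicate (h - 1) '_' ++ '#' :: List.replicate (h - 1) '_') ++ '\n' ::
    ((List.range (h - 2)).flatMap (fun k => pvMidRow h k ++ ['\n'])
      ++ List.replicate (2 * h - 1) '#')

theorem pv_join_newline (rows : List (List Char)) (last : List Char) :
    PySem.Chars.join ['\n'] (rows ++ [last])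
      = rows.flatMap (fun r => r ++ ['\n']) ++ last := by
  induction rows with
  | nil => simp [PySem.Chars.join_singleton]
  | cons x t ih =>
    cases t with
    | nil => simp [PySem.Chars.join_cons_cons, PySem.Chars.join_singleton]
    | cons y t' =>
      simp only [List.cons_append] at ih ⊢
      rw [PySem.Chars.join_cons_cons, ih]
      simp

-- mirroring a half row that ends in an underscore gives the hollow middle row
theorem pv_mirror_mid (a m : Nat) :
    (List.replicate a '_' ++ ['#'] ++ List.replicate (m + 1) '_')
      ++ ((List.replicate a '_' ++ ['#'] ++ List.replicate (m + 1) '_').dropLast).reverse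
    = List.replicate a '_' ++ '#' :: List.replicate (2 * m + 1) '_'
        ++ '#' :: List.replicate a '_' := by
  have h1 : List.replicate a '_' ++ ['#'] ++ List.replicate (m + 1) '_'
      = (List.replicate a '_' ++ '#' :: List.replicate m '_') ++ ['_'] := by
    simp [List.replicate_succ']
  rw [h1, List.dropLast_concat]
  simp [List.reverse_append, List.reverse_replicate, List.append_assoc]
  rw [show 2 * m + 1 = m + (m + 1) by omega, List.replicate_add]
  simp [List.replicate_succ, List.append_assoc]

theorem pv_A_form (h : Nat) (h2 : 2 ≤ h) :
    hollowTriangle (h : Int) = String.ofList (pvTriangle h) := by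
  have hlt : ¬ ((h : Int) < 1) := by omega
  have hne : ¬ ((h : Int) = 1) := by omega
  have hw : (2 * (h : Int) - 1) = ((2 * h - 1 : Nat) : Int) := by omega
  have hhalf : PySem.Int.floordiv (2 * (h : Int) - 1) 2 = ((h - 1 : Nat) : Int) := by
    rw [PySem.Int.floordiv_eq_ediv_of_pos (by norm_num)]; omega
  simp only [hollowTriangle, if_neg hlt, if_neg hne]
  have hfold : ∀ (z0 : List Char),
      (PySem.List.pyRange 0 ((h : Int) - 2) 1).foldl (fun z midRowNum =>
          (z ++ PySem.List.pyRepeat ['_']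
              (PySem.Int.floordiv ((2 * (h : Int) - 1) - ((2 * midRowNum + 1) + 2)) 2) ++ ['#']
             ++ PySem.List.pyRepeat ['_'] (2 * midRowNum + 1) ++ ['#']
             ++ PySem.List.pyRepeat ['_']
              (PySem.Int.floordiv ((2 * (h : Int) - 1) - ((2 * midRowNum + 1) + 2)) 2)) ++ ['\n']) z0
        = z0 ++ (List.range (h - 2)).flatMap (fun k => pvMidRow h k ++ ['\n']) := by
    intro z0
    have hcg : ∀ (acc : List Char) (m : Int), m ∈ PySem.List.pyRange 0 ((h : Int) - 2) 1 →
        ((acc ++ PySem.List.pyRepeat ['_']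
            (PySem.Int.floordiv ((2 * (h : Int) - 1) - ((2 * m + 1) + 2)) 2) ++ ['#']
           ++ PySem.List.pyRepeat ['_'] (2 * m + 1) ++ ['#']
           ++ PySem.List.pyRepeat ['_']
            (PySem.Int.floordiv ((2 * (h : Int) - 1) - ((2 * m + 1) + 2)) 2)) ++ ['\n'])
        = acc ++ (pvMidRow h m.toNat ++ ['\n']) := by
      intro acc m hm
      rw [PySem.List.mem_pyRange_one] at hm
      have hout : PySem.Int.floordiv ((2 * (h : Int) - 1) - ((2 * m + 1) + 2)) 2
          = ((h - 2 - m.toNat : Nat) : Int) := by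
        rw [PySem.Int.floordiv_eq_ediv_of_pos (by norm_num)]; omega
      have hc : (2 * m + 1) = ((2 * m.toNat + 1 : Nat) : Int) := by omega
      rw [hout, hc, PySem.List.pyRepeat_singleton, PySem.List.pyRepeat_singleton,
        Int.toNat_natCast, Int.toNat_natCast]
      simp [pvMidRow, List.append_assoc]
    rw [PySem.List.foldl_congr_mem _ _ _ _ hcg, PySem.List.foldl_append_eq_flatMap]
    congr 1
    rw [PySem.List.pyRange_one]
    rw [List.flatMap_map]
    have : ((h : Int) - 2 - 0).toNat = h - 2 := by omega
    rw [this]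
    apply List.flatMap_congr
    intro k hk
    simp
  by_cases hgt : (h : Int) > 2
  · rw [if_pos hgt, hfold, hhalf, hw, PySem.List.pyRepeat_singleton,
      PySem.List.pyRepeat_singleton, Int.toNat_natCast, Int.toNat_natCast]
    simp [pvTriangle, List.append_assoc]
  · have h2' : h = 2 := by omega
    subst h2'
    rw [if_neg hgt, hhalf, hw, PySem.List.pyRepeat_singleton,
      PySem.List.pyRepeat_singleton, Int.toNat_natCast, Int.toNat_natCast]
    simp [pvTriangle]

theorem pv_B_form (h : Nat) (h2 : 2 ≤ h) :
    hollowTriangle_alt (h : Int) = String.ofList (pvTriangle h) := by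
  have hlt : ¬ ((h : Int) < 1) := by omega
  simp only [hollowTriangle_alt, if_neg hlt]
  congr 1
  simp only [PySem.List.slice_to_neg_one, PySem.List.slice?_none_none_neg_one,
    Option.getD_some]
  rw [List.map_append, List.map_singleton, pv_join_newline]
  -- the base row: an all-'#' half mirrored is the all-'#' row of width 2h-1
  have hbase : PySem.List.pyRepeat ['#'] (h : Int)
        ++ (PySem.List.pyRepeat ['#'] (h : Int)).dropLast.reverse
      = List.replicate (2 * h - 1) '#' := by
    rw [PySem.List.pyRepeat_singleton, Int.toNat_natCast, List.dropLast_replicate,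
      List.reverse_replicate, ← List.replicate_add]
    congr 1
    omega
  rw [hbase]
  -- the half rows, evaluated at each index of range (h-1)
  rw [show PySem.List.pyRange 0 ((h : Int) - 1) 1
        = (List.range (h - 1)).map (fun k : Nat => (0 : Int) + (k : Int)) from by
      rw [PySem.List.pyRange_one]; congr 2; omega,
    List.map_map, List.map_map]
  have hG : ∀ k ∈ List.range (h - 1),
      (((fun hrow : List Char => hrow ++ hrow.dropLast.reverse)
        ∘ (fun r : Int =>
            PySem.List.pyRepeat ['_'] ((h : Int) - 1 - r) ++ ['#']
              ++ PySem.List.pyRepeat ['_'] r))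
          ∘ fun k : Nat => (0 : Int) + (k : Int)) k
      = (fun k : Nat =>
          if k = 0 then
            List.replicate (h - 1) '_' ++ '#' :: List.replicate (h - 1) '_'
          else pvMidRow h (k - 1)) k := by
    intro k hk
    rw [List.mem_range] at hk
    simp only [Function.comp_apply]
    have h1 : PySem.List.pyRepeat ['_'] ((h : Int) - 1 - ((0 : Int) + (k : Int)))
        = List.replicate (h - 1 - k) '_' := by
      rw [PySem.List.pyRepeat_singleton]; congr 1; omega
    have h2' : PySem.List.pyRepeat ['_'] ((0 : Int) + (k : Int))
        = List.replicate k '_' := by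
      rw [PySem.List.pyRepeat_singleton]; congr 1; omega
    rw [h1, h2']
    by_cases hk0 : k = 0
    · subst hk0
      rw [if_pos rfl]
      simp
    · rw [if_neg hk0]
      obtain ⟨m, rfl⟩ : ∃ m, k = m + 1 := ⟨k - 1, by omega⟩
      rw [pv_mirror_mid, show h - 1 - (m + 1) = h - 2 - m by omega,
        show m + 1 - 1 = m from rfl]
      simp [pvMidRow]
  rw [List.map_congr_left hG,
    show List.range (h - 1) = 0 :: List.map Nat.succ (List.range (h - 2)) by
        conv_lhs => rw [show h - 1 = (h - 2) + 1 by omega]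
        exact List.range_succ_eq_map,
    List.map_cons, List.flatMap_cons]
  rw [if_pos rfl]
  have hmid : ∀ k ∈ List.range (h - 2),
      ((fun k : Nat =>
          if k = 0 then
            List.replicate (h - 1) '_' ++ '#' :: List.replicate (h - 1) '_'
          else pvMidRow h (k - 1)) ∘ Nat.succ) k ++ ['\n'] = pvMidRow h k ++ ['\n'] := by
    intro k hk
    simp only [Function.comp_apply, Nat.succ_eq_add_one]
    rw [if_neg (by omega)]
    simp
  rw [List.map_map, List.flatMap_map, List.flatMap_congr hmid]
  simp [pvTriangle, List.append_assoc]

-- ===== VERDICT (by name: the statement is the Claim_ definition above) =====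
theorem hollowTriangle_spec : Claim_equal_hollowTriangle := by
  intro rowHeight _
  unfold Spec_hollowTriangle
  by_cases hlt : rowHeight < 1
  · simp [hollowTriangle, hollowTriangle_alt, if_pos hlt]
  · by_cases h1 : rowHeight = 1
    · subst h1; decide
    · have h2 : 2 ≤ rowHeight := by omega
      obtain ⟨h, rfl⟩ : ∃ h : Nat, rowHeight = (h : Int) :=
        ⟨rowHeight.toNat, by omega⟩
      rw [pv_A_form h (by omega), pv_B_form h (by omega)]
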